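-- pv_equiv track=rewrite | github.com/realraelrr/docling-skill | src/docling_skill/core.py | _normalize_engine_languages
-- ===== SOURCE A (Python) =====
-- OCRMAC_LANGUAGE_ALIASES = {
--     "zh-CN": "zh-Hans",
--     "zh-SG": "zh-Hans",
--     "zh-TW": "zh-Hant",
--     "zh-HK": "zh-Hant",
--     "en": "en-US",
-- }
--
-- def _normalize_ocr_languages(ocr_languages: list[str]) -> list[str]:
--     normalized: list[str] = []
--     for language in ocr_languages:
--         for token in language.split(","):
--             token = token.strip()
--             if token:
--                 normalized.append(token)
--     return normalized
--
-- def _normalize_engine_languages(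
--     ocr_engine: str,
--     ocr_languages: list[str],
-- ) -> list[str]:
--     normalized_languages = _normalize_ocr_languages(ocr_languages)
--     if ocr_engine != "ocrmac":
--         return normalized_languages
--     return [OCRMAC_LANGUAGE_ALIASES.get(language, language) for language in normalized_languages]
-- ===== SOURCE B (Python) =====
-- def _alias(ocr_engine, tok):
--     if ocr_engine != "ocrmac":
--         return tok
--     if tok == "zh-CN" or tok == "zh-SG":
--         return "zh-Hans"
--     if tok == "zh-TW" or tok == "zh-HK":
--         return "zh-Hant"
--     if tok == "en":
--         return "en-US"
--     return tok
--
--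
-- def _normalize_engine_languages(ocr_engine, ocr_languages):
--     # Single character-level scan: no split(), no strip(), no dict.
--     # buf holds the current token (leading whitespace never enters it);
--     # pend holds whitespace seen after token content, emitted only if
--     # more non-whitespace content follows (so trailing whitespace is dropped).
--     out = []
--     for language in ocr_languages:
--         buf = []
--         pend = []
--         for c in language + ",":
--             if c == ",":
--                 if buf:
--                     out.append(_alias(ocr_engine, "".join(buf)))
--                 buf = []
--                 pend = []
--             elif c.isspace():
--                 if buf:
--                     pend.append(c)
--             else:
--                 buf.extend(pend)
--                 buf.append(c)
--                 pend = []
--     return out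
-- ===== Notes on version B (the rewrite author's own statement) =====
-- stated objective: alternative
-- what changed: B replaces A's split(",")/strip()/dict-lookup pipeline by a single character-level scanner per string (a small state machine holding the current token and held-back whitespace, with an explicit if-chain for the ocrmac aliases), emitting each normalized token at comma/end-of-string flush points.
import Mathlib
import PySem

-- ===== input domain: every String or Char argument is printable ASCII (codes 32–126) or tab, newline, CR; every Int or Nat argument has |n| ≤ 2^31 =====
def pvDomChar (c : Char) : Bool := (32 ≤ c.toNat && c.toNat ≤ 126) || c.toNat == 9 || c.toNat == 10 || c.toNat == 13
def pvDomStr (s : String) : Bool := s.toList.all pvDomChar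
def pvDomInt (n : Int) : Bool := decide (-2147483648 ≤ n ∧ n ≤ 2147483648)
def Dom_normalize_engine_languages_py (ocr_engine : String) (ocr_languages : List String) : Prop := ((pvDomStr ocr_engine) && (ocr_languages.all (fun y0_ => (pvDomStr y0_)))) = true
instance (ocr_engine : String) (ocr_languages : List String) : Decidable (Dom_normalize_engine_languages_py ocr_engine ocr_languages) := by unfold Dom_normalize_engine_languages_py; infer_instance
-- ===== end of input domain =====

-- B replaces A's split/strip/dict-lookup passes by a single character-level scan with an
-- explicit alias decision chain (objective: alternative — same cost, different algorithm).

-- ===== PORT A =====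
def OCRMAC_LANGUAGE_ALIASES : PySem.Dict String String :=
  PySem.Dict.ofList
    [("zh-CN", "zh-Hans"), ("zh-SG", "zh-Hans"), ("zh-TW", "zh-Hant"),
     ("zh-HK", "zh-Hant"), ("en", "en-US")]

-- language.split(",") — sep "," is nonempty, so Str.split? is always `some`; `.getD []` only makes it total
def pySplitComma (s : String) : List String := (PySem.Str.split? s ",").getD []

def normalize_ocr_languages (ocr_languages : List String) : List String :=
  ocr_languages.foldl
    (fun normalized language =>
      (pySplitComma language).foldl
        (fun normalized token =>
          if PySem.Str.strip token ≠ "" then normalized ++ [PySem.Str.strip token] else normalized)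
        normalized)
    []

def normalize_engine_languages_py (ocr_engine : String) (ocr_languages : List String) : List String :=
  let normalized_languages := normalize_ocr_languages ocr_languages
  if ocr_engine ≠ "ocrmac" then normalized_languages
  else normalized_languages.map (fun language => OCRMAC_LANGUAGE_ALIASES.getD language language)

-- ===== PORT B =====
def pvAliasTok (ocr_engine : String) (tok : String) : String :=
  if ocr_engine ≠ "ocrmac" then tok
  else if tok = "zh-CN" ∨ tok = "zh-SG" then "zh-Hans"
  else if tok = "zh-TW" ∨ tok = "zh-HK" then "zh-Hant"
  else if tok = "en" then "en-US"
  else tok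

-- one character step of B's scanner; state = (emitted tokens, current token, held-back whitespace)
def pvStep (ocr_engine : String) (st : List String × List Char × List Char) (c : Char) :
    List String × List Char × List Char :=
  match st with
  | (out, buf, pend) =>
    if c = ',' then
      (if buf ≠ [] then out ++ [pvAliasTok ocr_engine (String.ofList buf)] else out, [], [])
    else if PySem.Chars.isspace c then
      (out, buf, if buf ≠ [] then pend ++ [c] else pend)
    else
      (out, buf ++ pend ++ [c], [])

def normalize_engine_languages_py_alt (ocr_engine : String) (ocr_languages : List String) : List String :=
  ocr_languages.foldl
    (fun out language =>
      ((language.toList ++ [',']).foldl (pvStep ocr_engine) (out, ([] : List Char), ([] : List Char))).1)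
    []

-- ===== PRECONDITION & SPEC =====
def Spec_normalize_engine_languages_py (ocr_engine : String) (ocr_languages : List String) (out : List String) : Prop := out = normalize_engine_languages_py_alt ocr_engine ocr_languages
instance (ocr_engine : String) (ocr_languages : List String) (out : List String) : Decidable (Spec_normalize_engine_languages_py ocr_engine ocr_languages out) := by unfold Spec_normalize_engine_languages_py; infer_instance

-- ===== CLAIM =====
def Claim_equal_normalize_engine_languages_py : Prop := ∀ (ocr_engine : String) (ocr_languages : List String), Dom_normalize_engine_languages_py ocr_engine ocr_languages → Spec_normalize_engine_languages_py ocr_engine ocr_languages (normalize_engine_languages_py ocr_engine ocr_languages)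

-- ===== LEMMAS AND PROOFS =====

-- reference comma split at the char level (Python split(","): cur is the reversed current piece)
def splitC : List Char → List Char → List (List Char)
  | [], cur => [cur.reverse]
  | c :: rest, cur => if c = ',' then cur.reverse :: splitC rest [] else splitC rest (c :: cur)

lemma splitOn_go_comma : ∀ (fuel : ℕ) (l cur : List Char) (acc : List (List Char)),
    l.length < fuel →
    PySem.Chars.splitOn.go [','] fuel l cur acc = acc.reverse ++ (splitC l cur).map id := by
  intro fuel
  induction fuel with
  | zero => intro l cur acc h; omega
  | succ fuel ih =>
    intro l cur acc h
    cases l with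
    | nil => simp [PySem.Chars.splitOn.go, splitC]
    | cons c rest =>
      by_cases hc : c = ','
      · subst hc
        have hgo : PySem.Chars.splitOn.go [','] (fuel+1) (',' :: rest) cur acc
              = PySem.Chars.splitOn.go [','] fuel (List.drop 1 (',' :: rest)) [] (cur.reverse :: acc) := by
            simp [PySem.Chars.splitOn.go, List.isPrefixOf]
        rw [hgo, ih _ _ _ (by simpa using Nat.lt_of_succ_lt_succ h)]
        simp [splitC]
      · have hgo : PySem.Chars.splitOn.go [','] (fuel+1) (c :: rest) cur acc
              = PySem.Chars.splitOn.go [','] fuel rest (c :: cur) acc := by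
            simp [PySem.Chars.splitOn.go, List.isPrefixOf, Ne.symm hc]
        rw [hgo, ih _ _ _ (by simpa using Nat.lt_of_succ_lt_succ h)]
        simp [splitC, hc]

lemma pySplitComma_eq (s : String) :
    pySplitComma s = (splitC s.toList []).map String.ofList := by
  unfold pySplitComma
  simp only [PySem.Str.split?, PySem.Chars.split?, PySem.Chars.splitOn]
  rw [show (("," : String)).toList = [','] from rfl]
  rw [splitOn_go_comma _ _ _ _ (by omega)]
  simp

-- whitespace facts about lstrip/rstrip
lemma lstrip_ws_append (ws x : List Char) (h : ws.all PySem.Chars.isspace = true) :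
    PySem.Chars.lstrip (ws ++ x) = PySem.Chars.lstrip x := by
  induction ws with
  | nil => simp
  | cons c cs ih =>
    simp only [List.all_cons, Bool.and_eq_true] at h
    simp [PySem.Chars.lstrip, List.dropWhile_cons, h.1]
    simpa [PySem.Chars.lstrip] using ih h.2

lemma rstrip_append_ws (x ws : List Char) (h : ws.all PySem.Chars.isspace = true) :
    PySem.Chars.rstrip (x ++ ws) = PySem.Chars.rstrip x := by
  simp only [PySem.Chars.rstrip, List.reverse_append]
  congr 1
  have := lstrip_ws_append ws.reverse x.reverse (by simpa using h)
  simpa [PySem.Chars.lstrip] using this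

lemma lstrip_cons_of_not (c : Char) (x : List Char) (h : PySem.Chars.isspace c = false) :
    PySem.Chars.lstrip (c :: x) = c :: x := by
  simp [PySem.Chars.lstrip, List.dropWhile_cons, h]

lemma rstrip_append_of_not (x : List Char) (c : Char) (h : PySem.Chars.isspace c = false) :
    PySem.Chars.rstrip (x ++ [c]) = x ++ [c] := by
  simp [PySem.Chars.rstrip, List.dropWhile_cons, h]

lemma strip_decomp (ws1 buf pend : List Char)
    (hws1 : ws1.all PySem.Chars.isspace = true) (hpend : pend.all PySem.Chars.isspace = true)
    (hl : PySem.Chars.lstrip buf = buf) (hr : PySem.Chars.rstrip buf = buf)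
    (hbe : buf = [] → pend = []) :
    PySem.Chars.strip (ws1 ++ buf ++ pend) = buf := by
  cases buf with
  | nil =>
    rw [hbe rfl]
    have h0 : PySem.Chars.lstrip ws1 = [] := by
      have := lstrip_ws_append ws1 [] hws1
      simpa using this
    simp [PySem.Chars.strip, h0, PySem.Chars.rstrip]
  | cons b bs =>
    have hb : PySem.Chars.isspace b = false := by
      by_contra h
      have hb' : PySem.Chars.isspace b = true := by revert h; cases PySem.Chars.isspace b <;> simp
      have : PySem.Chars.lstrip (b :: bs) = PySem.Chars.lstrip bs := by
        simp [PySem.Chars.lstrip, List.dropWhile_cons, hb']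
      rw [hl] at this
      have := congrArg List.length this
      simp [PySem.Chars.lstrip] at this
      have := List.length_dropWhile_le (p := PySem.Chars.isspace) (l := bs)
      omega
    simp only [PySem.Chars.strip]
    rw [List.append_assoc, lstrip_ws_append ws1 _ hws1,
      show (b :: bs) ++ pend = b :: (bs ++ pend) by simp,
      lstrip_cons_of_not b _ hb,
      show b :: (bs ++ pend) = (b :: bs) ++ pend by simp,
      rstrip_append_ws _ pend hpend, hr]

-- the emitted-token computation at a flush point
def pvTok (e : String) (t : List Char) : Option String :=
  if PySem.Chars.strip t = [] then none
  else some (pvAliasTok e (String.ofList (PySem.Chars.strip t)))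

-- B's scanner over one language (plus the virtual trailing ','), started mid-token,
-- emits exactly the stripped nonempty comma-pieces, aliased: cur is the reversed list of
-- characters consumed since the last comma, decomposed as leading ws ++ buf ++ held-back ws
lemma machine_run (e : String) : ∀ (cs : List Char) (out : List String) (buf pend cur ws1 : List Char),
    ws1.all PySem.Chars.isspace = true → pend.all PySem.Chars.isspace = true →
    PySem.Chars.lstrip buf = buf → PySem.Chars.rstrip buf = buf → (buf = [] → pend = []) →
    cur.reverse = ws1 ++ buf ++ pend →
    ((cs ++ [',']).foldl (pvStep e) (out, buf, pend)).1
      = out ++ (splitC cs cur).filterMap (pvTok e) := by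
  intro cs
  induction cs with
  | nil =>
    intro out buf pend cur ws1 hws1 hpend hl hr hbe hcur
    have hs : PySem.Chars.strip cur.reverse = buf := by
      rw [hcur]; exact strip_decomp ws1 buf pend hws1 hpend hl hr hbe
    simp only [List.nil_append, List.foldl_cons, List.foldl_nil, pvStep, splitC,
      List.filterMap_cons, List.filterMap_nil, pvTok, hs]
    by_cases hb : buf = []
    · simp [hb]
    · simp [hb]
  | cons c cs ih =>
    intro out buf pend cur ws1 hws1 hpend hl hr hbe hcur
    by_cases hc : c = ','
    · subst hc
      have hs : PySem.Chars.strip cur.reverse = buf := by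
        rw [hcur]; exact strip_decomp ws1 buf pend hws1 hpend hl hr hbe
      simp only [List.cons_append, List.foldl_cons, pvStep, eq_self_iff_true, ite_true]
      rw [ih _ [] [] [] [] rfl rfl rfl rfl (fun _ => rfl) (by simp)]
      rw [show splitC (',' :: cs) cur = cur.reverse :: splitC cs [] by simp [splitC]]
      rw [List.filterMap_cons]
      by_cases hb : buf = []
      · rw [hb] at hs
        simp [pvTok, hs, hb]
      · simp [pvTok, hs, hb]
    · by_cases hsp : PySem.Chars.isspace c = true
      · have hne : ¬ PySem.Chars.isspace ',' = true := by decide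
        by_cases hb : buf = []
        · have hp0 : pend = [] := hbe hb
          simp only [List.cons_append, List.foldl_cons, pvStep, if_neg hc, if_pos hsp, hb,
            ne_eq, not_true_eq_false, if_false, hp0]
          rw [ih _ [] [] (c :: cur) (ws1 ++ [c])
            (by simp_all) rfl rfl rfl (fun _ => rfl)
            (by simp [hcur, hb, hp0])]
          simp [splitC, hc]
        · simp only [List.cons_append, List.foldl_cons, pvStep, if_neg hc, if_pos hsp,
            ne_eq, hb, not_false_eq_true, if_true]
          rw [ih _ buf (pend ++ [c]) (c :: cur) ws1 hws1
            (by simp_all) hl hr (fun h => absurd h hb)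
            (by simp [hcur])]
          simp [splitC, hc]
      · have hsp' : PySem.Chars.isspace c = false := by revert hsp; cases PySem.Chars.isspace c <;> simp
        simp only [List.cons_append, List.foldl_cons, pvStep, if_neg hc, hsp', Bool.false_eq_true,
          if_false]
        have hl' : PySem.Chars.lstrip (buf ++ pend ++ [c]) = buf ++ pend ++ [c] := by
          cases buf with
          | nil =>
            rw [hbe rfl]
            simpa using lstrip_cons_of_not c [] hsp'
          | cons b bs =>
            have hbns : PySem.Chars.isspace b = false := by
              by_contra hx
              have hb' : PySem.Chars.isspace b = true := by revert hx; cases PySem.Chars.isspace b <;> simp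
              have : PySem.Chars.lstrip (b :: bs) = PySem.Chars.lstrip bs := by
                simp [PySem.Chars.lstrip, hb']
              rw [hl] at this
              have := congrArg List.length this
              simp [PySem.Chars.lstrip] at this
              have := List.length_dropWhile_le (p := PySem.Chars.isspace) (l := bs)
              omega
            have := lstrip_cons_of_not b (bs ++ pend ++ [c]) hbns
            simpa using this
        have hr' : PySem.Chars.rstrip (buf ++ pend ++ [c]) = buf ++ pend ++ [c] :=
          rstrip_append_of_not _ c hsp'
        rw [ih _ (buf ++ pend ++ [c]) [] (c :: cur) ws1 hws1 rfl hl' hr'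
          (by simp) (by simp [hcur])]
        simp [splitC, hc]

-- the literal alias dict looked up with default = key IS B's decision chain (for engine "ocrmac")
lemma alias_getD (t : String) :
    OCRMAC_LANGUAGE_ALIASES.getD t t = pvAliasTok "ocrmac" t := by
  simp only [OCRMAC_LANGUAGE_ALIASES, PySem.Dict.ofList, PySem.Dict.update, List.foldl_cons,
    List.foldl_nil, PySem.Dict.getD_insert, PySem.Dict.getD_empty, pvAliasTok]
  split_ifs <;> simp_all

-- A's inner append loop over the tokens of one language is a filterMap
lemma inner_foldl_eq (toks : List String) (acc : List String) :
    toks.foldl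
      (fun normalized token =>
        if PySem.Str.strip token = "" then normalized else normalized ++ [PySem.Str.strip token]) acc
    = acc ++ toks.filterMap (fun raw =>
        if PySem.Str.strip raw = "" then none else some (PySem.Str.strip raw)) := by
  induction toks generalizing acc with
  | nil => simp only [List.foldl_nil, List.filterMap_nil, List.append_nil]
  | cons t ts ih =>
    simp only [List.foldl_cons, List.filterMap_cons]
    split_ifs with h <;> simp [ih]

-- A's helper is one flatMap over the input
lemma normalize_ocr_languages_eq (ocr_languages : List String) :
    normalize_ocr_languages ocr_languages
    = ocr_languages.flatMap (fun language =>
        (pySplitComma language).filterMap (fun raw =>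
          if PySem.Str.strip raw = "" then none else some (PySem.Str.strip raw))) := by
  unfold normalize_ocr_languages
  simp only [ne_eq, ite_not]
  have key : ∀ (ls : List String) (acc : List String),
      ls.foldl
        (fun normalized language =>
          (pySplitComma language).foldl
            (fun normalized token =>
              if PySem.Str.strip token = "" then normalized else normalized ++ [PySem.Str.strip token])
            normalized) acc
      = acc ++ ls.flatMap (fun language =>
          (pySplitComma language).filterMap (fun raw =>
            if PySem.Str.strip raw = "" then none else some (PySem.Str.strip raw))) := by
    intro ls
    induction ls with
    | nil => intro acc; rw [List.flatMap_nil, List.append_nil]; rfl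
    | cons l ls ih =>
      intro acc
      simp only [List.foldl_cons, List.flatMap_cons]
      rw [inner_foldl_eq, ih, List.append_assoc]
  rw [key ocr_languages [], List.nil_append]

-- B is the same flatMap, token-for-token
lemma alt_eq (e : String) (ls : List String) :
    normalize_engine_languages_py_alt e ls
    = ls.flatMap (fun language => (splitC language.toList []).filterMap (pvTok e)) := by
  unfold normalize_engine_languages_py_alt
  have key : ∀ (ls : List String) (out : List String),
      ls.foldl
        (fun out language =>
          ((language.toList ++ [',']).foldl (pvStep e) (out, ([] : List Char), ([] : List Char))).1)
        out
      = out ++ ls.flatMap (fun language => (splitC language.toList []).filterMap (pvTok e)) := by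
    intro ls
    induction ls with
    | nil => intro out; simp
    | cons l ls ih =>
      intro out
      simp only [List.foldl_cons, List.flatMap_cons]
      rw [machine_run e _ out [] [] [] [] rfl rfl rfl rfl (fun _ => rfl) rfl, ih,
        List.append_assoc]
  rw [key ls [], List.nil_append]

-- per-token agreement of A's pipeline step with pvTok
lemma token_eq_other (e : String) (he : ¬ e = "ocrmac") (t : List Char) :
    (if PySem.Str.strip (String.ofList t) = "" then none
     else some (PySem.Str.strip (String.ofList t)))
    = pvTok e t := by
  have hts : PySem.Str.strip (String.ofList t) = String.ofList (PySem.Chars.strip t) := by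
    simp [PySem.Str.strip]
  rw [hts]
  by_cases h : PySem.Chars.strip t = []
  · simp [pvTok, h]
  · have hne : String.ofList (PySem.Chars.strip t) ≠ "" := by
      intro hx
      apply h
      have := congrArg String.toList hx
      simpa using this
    simp [pvTok, h, hne, pvAliasTok, he]

lemma token_eq_ocrmac (t : List Char) :
    Option.map (fun s => OCRMAC_LANGUAGE_ALIASES.getD s s)
      (if PySem.Str.strip (String.ofList t) = "" then none
       else some (PySem.Str.strip (String.ofList t)))
    = pvTok "ocrmac" t := by
  have hts : PySem.Str.strip (String.ofList t) = String.ofList (PySem.Chars.strip t) := by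
    simp [PySem.Str.strip]
  rw [hts]
  by_cases h : PySem.Chars.strip t = []
  · simp [pvTok, h]
  · have hne : String.ofList (PySem.Chars.strip t) ≠ "" := by
      intro hx
      apply h
      have := congrArg String.toList hx
      simpa using this
    simp only [pvTok, h, if_neg, hne, ite_false, Option.map_some]
    rw [alias_getD]

-- ===== VERDICT =====
theorem normalize_engine_languages_py_spec : Claim_equal_normalize_engine_languages_py := by
  intro ocr_engine ocr_languages _
  unfold Spec_normalize_engine_languages_py
  unfold normalize_engine_languages_py
  rw [normalize_ocr_languages_eq, alt_eq]
  by_cases he : ocr_engine = "ocrmac"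
  · subst he
    rw [if_neg (by simp)]
    rw [List.map_flatMap]
    refine List.flatMap_congr ?_ ; intro language _
    rw [pySplitComma_eq, List.filterMap_map, List.map_filterMap]
    refine List.filterMap_congr ?_ ; intro raw _
    exact token_eq_ocrmac raw
  · rw [if_pos he]
    refine List.flatMap_congr ?_ ; intro language _
    rw [pySplitComma_eq, List.filterMap_map]
    refine List.filterMap_congr ?_ ; intro raw _
    exact token_eq_other ocr_engine he raw
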